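-- pv_equiv track=rewrite | github.com/fogleman/AdventOfCode2024 | 09.py | find
-- ===== SOURCE A (Python) =====
-- def find(value, n):
--     for i in range(len(value)-n):
--         ok = True
--         for j in range(i, i + n):
--             if value[j] >= 0:
--                 ok = False
--                 break
--         if ok:
--             return i
--     return -1
-- ===== SOURCE B (Python) =====
-- def find(value, n):
--     if n <= 0:
--         return 0
--     run = 0
--     for i, v in enumerate(value):
--         run = run + 1 if v < 0 else 0
--         if run == n:
--             return i - n + 1
--     return -1
-- ===== Notes on version B (the rewrite author's own statement) =====
-- stated objective: alternative
-- what changed: Replaces the restart-per-start nested window scan with a single pass that maintains the length of the current run of consecutive negatives.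
-- intended difference: On inputs where the only all-negative window of length n starts at the last feasible index len(value)-n (including value=[], n=0), A's range(len(value)-n) stops one start short and returns -1, while B returns that start index len(value)-n, which is the intended first index of n consecutive negatives. — e.g. on find([-1], 1): A returns -1, B returns 0
import Mathlib
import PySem

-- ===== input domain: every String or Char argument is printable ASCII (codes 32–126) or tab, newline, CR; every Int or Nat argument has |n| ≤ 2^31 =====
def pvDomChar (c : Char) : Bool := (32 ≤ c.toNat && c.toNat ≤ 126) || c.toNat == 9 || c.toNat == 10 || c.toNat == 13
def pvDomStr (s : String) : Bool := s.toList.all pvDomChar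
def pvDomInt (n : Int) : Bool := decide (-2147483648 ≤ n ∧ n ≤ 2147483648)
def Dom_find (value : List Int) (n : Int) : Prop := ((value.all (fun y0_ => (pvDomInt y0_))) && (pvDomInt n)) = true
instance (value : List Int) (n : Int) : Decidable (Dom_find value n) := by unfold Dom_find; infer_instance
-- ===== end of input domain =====

-- B replaces A's nested scan (a fresh window check at every start index) by one pass that
-- tracks the current run of consecutive negatives; B also returns the valid start at index
-- len(value)-n, which A's off-by-one range misses (see D_find below).

-- ===== PORT A =====
-- inner 'for j in range(i, i+n)' loop with its break; the index j is always in range when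
-- reached (0 ≤ i ≤ j < len(value)), so the total pyGetD is exact here
def findInner (value : List Int) : List Int → Bool
  | [] => true
  | j :: rest =>
      if PySem.List.pyGetD value j 0 ≥ 0 then false
      else findInner value rest

-- 'for i in range(len(value)-n)': i counts up from 0; the remaining iteration count is the
-- structural fuel (range(a,b) is lazy in Python, so the range is not materialized here either)
def findOuter (value : List Int) (n : Int) : Nat → Int → Int
  | 0, _ => -1
  | fuel + 1, i =>
      if findInner value (PySem.List.pyRange i (i + n) 1) then i
      else findOuter value n fuel (i + 1)

def find (value : List Int) (n : Int) : Int :=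
  findOuter value n ((value.length : Int) - n).toNat 0

-- ===== PORT B =====
def findAltLoop (n : Int) : List (Int × Int) → Int → Int
  | [], _ => -1
  | (i, v) :: rest, run =>
      let run' := if v < 0 then run + 1 else 0
      if run' = n then i - n + 1 else findAltLoop n rest run'

def find_alt (value : List Int) (n : Int) : Int :=
  if n ≤ 0 then 0
  else findAltLoop n (PySem.List.enumerate value 0) 0

-- ===== PRECONDITION & SPEC =====
-- On inputs where the only all-negative window of length n starts at the last feasible index
-- len(value)-n (including value=[], n=0), A's range(len(value)-n) stops one start short and
-- returns -1, while B returns that start len(value)-n — the intended first index of n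
-- consecutive negatives.
def D_find (value : List Int) (n : Int) : Prop :=
  0 ≤ n ∧ n.toNat ≤ value.length ∧
  (value.drop (value.length - n.toNat)).all (fun v => decide (v < 0)) = true ∧
  ∀ i ∈ List.range (value.length - n.toNat),
    ((value.drop i).take n.toNat).any (fun v => decide (0 ≤ v)) = true
instance (value : List Int) (n : Int) : Decidable (D_find value n) := by
  unfold D_find; infer_instance

def Spec_find (value : List Int) (n : Int) (out : Int) : Prop :=
  ¬ D_find value n → out = find_alt value n
instance (value : List Int) (n : Int) (out : Int) : Decidable (Spec_find value n out) := by
  unfold Spec_find; infer_instance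

def pvDiffWitness_find : List Int × Int := ([-1], 1)
def pvDiffWitnessOut_find : Int × Int := (-1, 0)

-- ===== CLAIM (what is proved, stated in full; the proofs are below) =====
def Claim_unchanged_find : Prop :=
  ∀ (value : List Int) (n : Int), Dom_find value n → Spec_find value n (find value n)
def Claim_changed_find : Prop :=
  Dom_find (pvDiffWitness_find.1) (pvDiffWitness_find.2) ∧
  D_find (pvDiffWitness_find.1) (pvDiffWitness_find.2) ∧
  find (pvDiffWitness_find.1) (pvDiffWitness_find.2) = pvDiffWitnessOut_find.1 ∧
  find_alt (pvDiffWitness_find.1) (pvDiffWitness_find.2) = pvDiffWitnessOut_find.2 ∧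
  pvDiffWitnessOut_find.1 ≠ pvDiffWitnessOut_find.2
def Claim_exact_find : Prop :=
  ∀ (value : List Int) (n : Int), Dom_find value n → D_find value n →
    find value n ≠ find_alt value n

-- ===== LEMMAS AND PROOFS =====

-- the window value[s:s+m] is all negative
def goodB (value : List Int) (m s : Nat) : Bool :=
  ((value.drop s).take m).all (fun v => decide (v < 0))

-- length of the maximal all-negative suffix of value[:p]
def streak (value : List Int) : Nat → Nat
  | 0 => 0
  | p + 1 => if value.getD p 0 < 0 then streak value p + 1 else 0

theorem streak_le (value : List Int) (p : Nat) : streak value p ≤ p := by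
  induction p with
  | zero => simp [streak]
  | succ p ih => simp only [streak]; split <;> omega

theorem streak_succ_le (value : List Int) (p : Nat) :
    streak value (p + 1) ≤ streak value p + 1 := by
  simp only [streak]; split <;> omega

theorem streak_char (value : List Int) (p k : Nat) :
    k ≤ streak value p ↔ k ≤ p ∧ ∀ j, p - k ≤ j → j < p → value.getD j 0 < 0 := by
  induction p generalizing k with
  | zero =>
    simp only [streak]
    constructor
    · intro h; exact ⟨h, by omega⟩
    · rintro ⟨h, -⟩; exact h
  | succ p ih =>
    simp only [streak]
    cases k with
    | zero => simp; omega
    | succ k' =>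
      split
      · next hc =>
        rw [Nat.succ_le_succ_iff, ih]
        constructor
        · rintro ⟨h1, h2⟩
          refine ⟨by omega, fun j hj1 hj2 => ?_⟩
          rcases Nat.lt_or_ge j p with hj | hj
          · exact h2 j (by omega) hj
          · have : j = p := by omega
            simpa [this] using hc
        · rintro ⟨h1, h2⟩
          exact ⟨by omega, fun j hj1 hj2 => h2 j (by omega) (by omega)⟩
      · next hc =>
        simp only [Nat.le_zero, Nat.succ_ne_zero, false_iff, not_and, not_forall]
        intro h1
        exact ⟨p, by omega, by omega, by simpa using hc⟩

theorem goodB_iff (value : List Int) (m s : Nat) (h : s + m ≤ value.length) :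
    goodB value m s = true ↔ ∀ j, s ≤ j → j < s + m → value.getD j 0 < 0 := by
  induction m generalizing s with
  | zero => simp [goodB]; omega
  | succ m ih =>
    have hs : s < value.length := by omega
    have hrec := ih (s + 1) (by omega)
    rw [goodB] at hrec ⊢
    rw [List.drop_eq_getElem_cons hs, List.take_succ_cons, List.all_cons,
        Bool.and_eq_true, decide_eq_true_eq, hrec]
    constructor
    · rintro ⟨h1, h2⟩ j hj1 hj2
      rcases Nat.eq_or_lt_of_le hj1 with hj | hj
      · subst hj; rw [List.getD_eq_getElem _ _ hs]; exact h1
      · exact h2 j (by omega) (by omega)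
    · intro hall
      refine ⟨?_, fun j hj1 hj2 => hall j (by omega) (by omega)⟩
      have := hall s (le_refl s) (by omega)
      rwa [List.getD_eq_getElem _ _ hs] at this

theorem any_nonneg_of_not_all (l : List Int)
    (h : l.all (fun v => decide (v < 0)) = false) :
    l.any (fun v => decide (0 ≤ v)) = true := by
  obtain ⟨x, hx, hfx⟩ := List.all_eq_false.mp h
  rw [List.any_eq_true]
  refine ⟨x, hx, ?_⟩
  simp only [decide_eq_true_eq] at hfx ⊢
  omega

theorem not_all_of_any_nonneg (l : List Int)
    (h : l.any (fun v => decide (0 ≤ v)) = true) :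
    l.all (fun v => decide (v < 0)) = false := by
  obtain ⟨x, hx, hx0⟩ := List.any_eq_true.mp h
  rw [← Bool.not_eq_true, List.all_eq_true]
  intro hc
  have := hc x hx
  simp only [decide_eq_true_eq] at this hx0
  omega

theorem findq_range_none (q : Nat → Bool) (a k : Nat)
    (h : ∀ i, a ≤ i → i < a + k → q i = false) :
    (List.range' a k).find? q = none := by
  rw [List.find?_eq_none]
  intro i hi
  rw [List.mem_range'_1] at hi
  simp [h i hi.1 hi.2]

theorem findq_range_some (q : Nat → Bool) (a k e : Nat)
    (h1 : a ≤ e) (h2 : e < a + k) (h3 : ∀ i, a ≤ i → i < e → q i = false)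
    (h4 : q e = true) : (List.range' a k).find? q = some e := by
  induction k generalizing a with
  | zero => omega
  | succ k ih =>
    rw [List.range'_succ]
    rcases Nat.eq_or_lt_of_le h1 with he | he
    · rw [List.find?_cons_of_pos (he ▸ h4), he]
    · rw [List.find?_cons_of_neg (by simp [h3 a (le_refl a) he])]
      exact ih (a + 1) (by omega) (by omega) (fun i hi1 hi2 => h3 i (by omega) hi2)

-- ---- characterization of port A ----

theorem inner_eq (value : List Int) (m i : Nat) (h : i + m ≤ value.length) :
    findInner value (PySem.List.pyRange (i : Int) ((i : Int) + (m : Int)) 1) = goodB value m i := by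
  induction m generalizing i with
  | zero =>
    rw [PySem.List.pyRange_one_eq_nil (by omega)]
    simp [findInner, goodB]
  | succ m ih =>
    have hs : i < value.length := by omega
    have hrec : findInner value
        (PySem.List.pyRange ((i : Int) + 1) ((i : Int) + ((m + 1 : Nat) : Int)) 1) =
        goodB value m (i + 1) := by
      rw [show ((i : Int) + 1) = ((i + 1 : Nat) : Int) by push_cast; ring,
          show ((i : Int) + ((m + 1 : Nat) : Int)) = ((i + 1 : Nat) : Int) + (m : Int) by
            push_cast; ring]
      exact ih (i + 1) (by omega)
    rw [PySem.List.pyRange_one_cons (by push_cast; omega), findInner,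
        PySem.List.pyGetD_natCast value i 0, List.getD_eq_getElem _ _ hs, hrec]
    simp only [goodB, List.drop_eq_getElem_cons hs, List.take_succ_cons, List.all_cons]
    by_cases hge : value[i] ≥ 0
    · rw [if_pos hge]
      simp [show ¬ value[i] < 0 by omega]
    · rw [if_neg hge]
      simp [show value[i] < 0 by omega]

theorem outer_eq (value : List Int) (n : Int) (m : Nat) (hnm : n = (m : Int)) :
    ∀ (k a : Nat), a + k + m ≤ value.length →
    findOuter value n k (a : Int) =
      (match (List.range' a k).find? (goodB value m) with
       | some i => (i : Int)
       | none => -1) := by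
  intro k
  induction k with
  | zero =>
    intro a h
    simp [findOuter, List.range']
  | succ k ih =>
    intro a h
    rw [findOuter,
        show (a : Int) + n = (a : Int) + (m : Int) by rw [hnm],
        inner_eq value m a (by omega), List.range'_succ]
    cases hg : goodB value m a with
    | true =>
      rw [if_pos rfl, List.find?_cons_of_pos hg]
    | false =>
      rw [if_neg (by simp), List.find?_cons_of_neg (by simp [hg])]
      rw [show (a : Int) + 1 = ((a + 1 : Nat) : Int) by push_cast; ring]
      exact ih (a + 1) (by omega)

theorem A_char (value : List Int) (n : Int) (m : Nat) (hnm : n = (m : Int))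
    (hmL : m ≤ value.length) :
    find value n =
      (match (List.range' 0 (value.length - m)).find? (goodB value m) with
       | some i => (i : Int)
       | none => -1) := by
  have h0 : ((value.length : Int) - n).toNat = value.length - m := by
    rw [hnm]; omega
  rw [find, h0, show (0 : Int) = ((0 : Nat) : Int) from rfl]
  exact outer_eq value n m hnm (value.length - m) 0 (by omega)

theorem A_neg (value : List Int) (n : Int) (hL : (value.length : Int) < n) :
    find value n = -1 := by
  rw [find, show ((value.length : Int) - n).toNat = 0 by omega]
  rfl

-- ---- characterization of port B ----

theorem loop_eq (value : List Int) (n : Int) (m : Nat) (hnm : n = (m : Int)) :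
    ∀ (s : List Int) (p : Nat), value.drop p = s → streak value p < m →
    findAltLoop n (PySem.List.enumerate s (p : Int)) ((streak value p : Nat) : Int) =
      (match (List.range' p (value.length - p)).find? (fun e => streak value (e + 1) == m) with
       | some e => (e : Int) - n + 1
       | none => -1) := by
  intro s
  induction s with
  | nil =>
    intro p hdrop hrun
    have hp : value.length ≤ p := by
      by_contra hc
      have := List.drop_eq_nil_iff.mp hdrop
      omega
    rw [show value.length - p = 0 by omega]
    simp [PySem.List.enumerate_nil, findAltLoop, List.range']
  | cons v rest ih =>
    intro p hdrop hrun
    have hp : p < value.length := by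
      by_contra hc
      rw [List.drop_eq_nil_of_le (by omega)] at hdrop
      simp at hdrop
    have hv : value.getD p 0 = v := by
      rw [List.getD_eq_getElem _ _ hp]
      have h2 := List.drop_eq_getElem_cons hp
      rw [hdrop] at h2
      exact ((List.cons.injEq _ _ _ _).mp h2).1.symm
    have hstep : ((if v < 0 then ((streak value p : Nat) : Int) + 1 else 0)) =
        ((streak value (p + 1) : Nat) : Int) := by
      simp only [streak, hv]
      split <;> simp
    rw [PySem.List.enumerate_cons]
    simp only [findAltLoop]
    rw [hstep, show value.length - p = (value.length - (p + 1)) + 1 by omega, List.range'_succ]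
    by_cases hhit : ((streak value (p + 1) : Nat) : Int) = n
    · have hhm : streak value (p + 1) = m := by
        rw [hnm] at hhit
        exact_mod_cast hhit
      rw [if_pos hhit, List.find?_cons_of_pos (by simp [hhm])]
    · rw [if_neg hhit, List.find?_cons_of_neg]
      · have hlt : streak value (p + 1) < m := by
          have h1 := streak_succ_le value p
          have h2 : streak value (p + 1) ≠ m := by
            intro hc
            exact hhit (by rw [hc, hnm])
          omega
        rw [show (p : Int) + 1 = ((p + 1 : Nat) : Int) by push_cast; ring]
        exact ih (p + 1) (by rw [← List.drop_drop, hdrop]; rfl) hlt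
      · simp only [beq_iff_eq]
        intro hc
        exact hhit (by rw [hc, hnm])

theorem B_end (value : List Int) (n : Int) (m : Nat) (hnm : n = (m : Int)) (hm : 1 ≤ m) :
    find_alt value n =
      (match (List.range' 0 value.length).find? (fun e => streak value (e + 1) == m) with
       | some e => (e : Int) - n + 1
       | none => -1) := by
  rw [find_alt, if_neg (by omega)]
  have h := loop_eq value n m hnm value 0 rfl (by simp [streak]; omega)
  simpa [streak] using h

-- first end-of-run hit ⇔ first all-negative window start, shifted by m-1
theorem B_start (value : List Int) (n : Int) (m : Nat) (hnm : n = (m : Int)) (hm : 1 ≤ m)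
    (hmL : m ≤ value.length) :
    find_alt value n =
      (match (List.range' 0 (value.length - m + 1)).find? (goodB value m) with
       | some i => (i : Int)
       | none => -1) := by
  rw [B_end value n m hnm hm]
  by_cases hex : ∃ i, i < value.length - m + 1 ∧ goodB value m i = true
  · obtain ⟨i0, hi0lt, hi0good, hnotbefore⟩ :
        ∃ i0, i0 < value.length - m + 1 ∧ goodB value m i0 = true ∧
          ∀ i, i < i0 → goodB value m i = false := by
      have hlt := (Nat.find_spec hex).1
      refine ⟨Nat.find hex, hlt, (Nat.find_spec hex).2, ?_⟩
      intro i hi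
      by_contra hc
      rw [Bool.not_eq_false] at hc
      exact Nat.find_min hex hi ⟨by omega, hc⟩
    have hwin : ∀ j, i0 ≤ j → j < i0 + m → value.getD j 0 < 0 :=
      (goodB_iff value m i0 (by omega)).mp hi0good
    have heq : streak value (i0 + m) = m := by
      have hge : m ≤ streak value (i0 + m) := by
        rw [streak_char]
        exact ⟨by omega, fun j hj1 hj2 => hwin j (by omega) hj2⟩
      by_contra hc
      have hgt : m + 1 ≤ streak value (i0 + m) := by omega
      rw [streak_char] at hgt
      obtain ⟨hle, hall⟩ := hgt
      have hg1 : goodB value m (i0 - 1) = true := by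
        rw [goodB_iff value m (i0 - 1) (by omega)]
        intro j hj1 hj2
        exact hall j (by omega) (by omega)
      have hg2 := hnotbefore (i0 - 1) (by omega)
      rw [hg1] at hg2
      exact Bool.noConfusion hg2
    have hfind1 : (List.range' 0 value.length).find? (fun e => streak value (e + 1) == m)
        = some (i0 + m - 1) := by
      apply findq_range_some
      · omega
      · omega
      · intro e he1 he2
        simp only [beq_eq_false_iff_ne, ne_eq]
        intro hc
        have hge : m ≤ streak value (e + 1) := by omega
        rw [streak_char] at hge
        obtain ⟨hle, hall⟩ := hge
        have hg1 : goodB value m (e + 1 - m) = true := by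
          rw [goodB_iff value m (e + 1 - m) (by omega)]
          intro j hj1 hj2
          exact hall j (by omega) (by omega)
        have hg2 := hnotbefore (e + 1 - m) (by omega)
        rw [hg1] at hg2
        exact Bool.noConfusion hg2
      · simp only [beq_iff_eq]
        rw [show i0 + m - 1 + 1 = i0 + m by omega]
        exact heq
    have hfind2 : (List.range' 0 (value.length - m + 1)).find? (goodB value m) = some i0 := by
      apply findq_range_some
      · omega
      · omega
      · intro i hi1 hi2; exact hnotbefore i hi2
      · exact hi0good
    rw [hfind1, hfind2]
    subst hnm
    show ((i0 + m - 1 : Nat) : Int) - (m : Int) + 1 = ((i0 : Nat) : Int)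
    omega
  · push Not at hex
    have hnone2 : (List.range' 0 (value.length - m + 1)).find? (goodB value m) = none := by
      apply findq_range_none
      intro i hi1 hi2
      by_contra hc
      rw [Bool.not_eq_false] at hc
      exact hex i (by omega) hc
    have hnone1 : (List.range' 0 value.length).find? (fun e => streak value (e + 1) == m)
        = none := by
      apply findq_range_none
      intro e he1 he2
      simp only [beq_eq_false_iff_ne, ne_eq]
      intro hc
      have hgem : m ≤ streak value (e + 1) := by omega
      rw [streak_char] at hgem
      obtain ⟨hle, hall⟩ := hgem
      have hgood : goodB value m (e + 1 - m) = true := by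
        rw [goodB_iff value m (e + 1 - m) (by omega)]
        intro j hj1 hj2
        exact hall j (by omega) (by omega)
      exact hex (e + 1 - m) (by omega) hgood
    rw [hnone1, hnone2]

theorem B_neg (value : List Int) (n : Int) (m : Nat) (hnm : n = (m : Int)) (hm : 1 ≤ m)
    (hL : value.length < m) : find_alt value n = -1 := by
  rw [B_end value n m hnm hm]
  rw [findq_range_none]
  intro e he1 he2
  simp only [beq_eq_false_iff_ne, ne_eq]
  have h1 := streak_le value (e + 1)
  omega

-- ===== VERDICT (by name: the statement is the Claim_ definition above) =====
theorem find_spec : Claim_unchanged_find := by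
  intro value n _ hnd
  by_cases hn0 : n ≤ 0
  · rw [find_alt, if_pos hn0]
    by_cases hneg : n < 0
    · rw [find, show ((value.length : Int) - n).toNat
            = (((value.length : Int) - n).toNat - 1) + 1 by omega, findOuter,
          PySem.List.pyRange_one_eq_nil (by omega)]
      simp [findInner]
    · have hn : n = 0 := by omega
      subst hn
      have hL : value.length ≠ 0 := by
        intro h0
        rw [List.length_eq_zero_iff] at h0
        subst h0
        exact hnd (by decide)
      rw [find, show ((value.length : Int) - 0).toNat
            = (((value.length : Int) - 0).toNat - 1) + 1 by omega, findOuter,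
          PySem.List.pyRange_one_eq_nil (by omega)]
      simp [findInner]
  · have hnm : n = (n.toNat : Int) := (Int.toNat_of_nonneg (by omega)).symm
    have hm : 1 ≤ n.toNat := by omega
    by_cases hmL : n.toNat ≤ value.length
    · rw [A_char value n n.toNat hnm hmL, B_start value n n.toNat hnm hm hmL,
          List.range'_concat, List.find?_append]
      cases hf : (List.range' 0 (value.length - n.toNat)).find? (goodB value n.toNat) with
      | some i => simp
      | none =>
        have hlast : goodB value n.toNat (value.length - n.toNat) = false := by
          by_contra hc
          rw [Bool.not_eq_false] at hc
          apply hnd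
          refine ⟨by omega, hmL, ?_, ?_⟩
          · have ht : (value.drop (value.length - n.toNat)).take n.toNat =
                value.drop (value.length - n.toNat) := by
              apply List.take_of_length_le
              simp
              omega
            rw [goodB, ht] at hc
            exact hc
          · intro i hi
            rw [List.mem_range] at hi
            have hgi : goodB value n.toNat i = false := by
              have h2 := List.find?_eq_none.mp hf i (by rw [List.mem_range'_1]; omega)
              simpa using h2
            rw [goodB] at hgi
            exact any_nonneg_of_not_all _ hgi
        rw [Option.none_or, show 0 + 1 * (value.length - n.toNat) = value.length - n.toNat by omega,
            show [value.length - n.toNat] = (value.length - n.toNat) :: ([] : List Nat) from rfl,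
            List.find?_cons_of_neg (by simp [hlast]), List.find?_nil]
    · rw [A_neg value n (by omega), B_neg value n n.toNat hnm hm (by omega)]

theorem find_changed : Claim_changed_find := by
  unfold Claim_changed_find; decide

theorem find_tight : Claim_exact_find := by
  intro value n _ hd
  obtain ⟨hn0, hmL, h3, h4⟩ := hd
  have hnm : n = (n.toNat : Int) := (Int.toNat_of_nonneg hn0).symm
  by_cases hm0 : n.toNat = 0
  · have hL : value.length = 0 := by
      by_contra hc
      have := h4 0 (by rw [List.mem_range]; omega)
      simp [hm0] at this
    rw [List.length_eq_zero_iff] at hL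
    subst hL
    have hn : n = 0 := by omega
    subst hn
    decide
  · have hm : 1 ≤ n.toNat := by omega
    have hgood : goodB value n.toNat (value.length - n.toNat) = true := by
      rw [goodB, List.take_of_length_le (by simp; omega)]
      exact h3
    have hbefore : ∀ i, i < value.length - n.toNat → goodB value n.toNat i = false := by
      intro i hi
      rw [goodB]
      exact not_all_of_any_nonneg _ (h4 i (by rw [List.mem_range]; omega))
    have hA : find value n = -1 := by
      rw [A_char value n n.toNat hnm hmL, findq_range_none _ _ _
        (fun i hi1 hi2 => hbefore i (by omega))]
    have hB : find_alt value n = ((value.length - n.toNat : Nat) : Int) := by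
      rw [B_start value n n.toNat hnm hm hmL, findq_range_some _ _ _
        (value.length - n.toNat) (by omega) (by omega)
        (fun i hi1 hi2 => hbefore i hi2) hgood]
    rw [hA, hB]
    omega
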